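-- pv_equiv track=rewrite | github.com/acekyd/Speedy | exts/challenger.py | get_reached
-- ===== SOURCE A (Python) =====
-- def get_reached(rarity: str, current_level: int, card: int, aimed_level: int) -> int:
--
--     levels = [1, 2, 3, 4, 5, 6, 7, 8, 9, 10, 11, 12, 13, 14, 15, 16]
--     if rarity == "Challenger":
--         cards = [
--             0,
--             20,
--             50,
--             100,
--             170,
--             250,
--             350,
--             500,
--             700,
--             1000,
--             1400,
--             1900,
--             2500,
--             3200,
--             4000,
--             5000,
--             0,
--         ]
--         rings = [
--             0,
--             500,
--             2500,
--             8000,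
--             16000,
--             32000,
--             50000,
--             80000,
--             120000,
--             150000,
--             180000,
--             240000,
--             300000,
--             400000,
--             550000,
--             750000,
--             0,
--         ]
--         exps = [
--             0,
--             50,
--             100,
--             150,
--             200,
--             250,
--             350,
--             450,
--             550,
--             650,
--             750,
--             900,
--             1050,
--             1200,
--             1350,
--             1600,
--             0,
--         ]
--
--     level = current_level
--     i = levels.index(current_level + 1 if current_level == 0 else current_level)
--     aimed_level_index = int(levels.index(aimed_level)) + 1
--     total_cards = 0 if level != 0 else 500
--     total_exps = 0
--     total_rings = 0
--
--     if level != 1: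
--         for i in range(i + 1, aimed_level_index):
--             total_cards += cards[i]
--             total_rings += rings[i]
--             total_exps += exps[i]
--     else:
--         for i in range(i, aimed_level_index):
--             total_cards += cards[i]
--             total_rings += rings[i]
--             total_exps += exps[i]
--
--     total_cards -= card
--
--     return total_cards, total_rings, total_exps
-- ===== SOURCE B (Python) =====
-- def _prefix(xs):
--     out = [0]
--     for x in xs:
--         out.append(out[-1] + x)
--     return out
--
--
-- def get_reached(rarity: str, current_level: int, card: int, aimed_level: int) -> int:
--     levels = list(range(1, 17))
--     i = levels.index(current_level + 1 if current_level == 0 else current_level)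
--     end = levels.index(aimed_level) + 1
--     start = i if current_level == 1 else i + 1
--     base = 500 if current_level == 0 else 0
--
--     if start >= end:  # nothing to sum
--         return base - card, 0, 0
--
--     if rarity == "Challenger":
--         cards = [0, 20, 50, 100, 170, 250, 350, 500, 700, 1000,
--                  1400, 1900, 2500, 3200, 4000, 5000, 0]
--         rings = [0, 500, 2500, 8000, 16000, 32000, 50000, 80000, 120000,
--                  150000, 180000, 240000, 300000, 400000, 550000, 750000, 0]
--         exps = [0, 50, 100, 150, 200, 250, 350, 450, 550, 650,
--                 750, 900, 1050, 1200, 1350, 1600, 0]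
--
--     pc = _prefix(cards)
--     pr = _prefix(rings)
--     pe = _prefix(exps)
--
--     return base + pc[end] - pc[start] - card, pr[end] - pr[start], pe[end] - pe[start]
-- ===== Notes on version B (the rewrite author's own statement) =====
-- stated objective: alternative
-- what changed: A accumulates cards/rings/exps index by index in a range loop; B returns early when the range is empty and otherwise builds cumulative prefix-sum tables once, returning each total as P[end] - P[start] (same 500/level-0 base and -card adjustments).
import Mathlib
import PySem

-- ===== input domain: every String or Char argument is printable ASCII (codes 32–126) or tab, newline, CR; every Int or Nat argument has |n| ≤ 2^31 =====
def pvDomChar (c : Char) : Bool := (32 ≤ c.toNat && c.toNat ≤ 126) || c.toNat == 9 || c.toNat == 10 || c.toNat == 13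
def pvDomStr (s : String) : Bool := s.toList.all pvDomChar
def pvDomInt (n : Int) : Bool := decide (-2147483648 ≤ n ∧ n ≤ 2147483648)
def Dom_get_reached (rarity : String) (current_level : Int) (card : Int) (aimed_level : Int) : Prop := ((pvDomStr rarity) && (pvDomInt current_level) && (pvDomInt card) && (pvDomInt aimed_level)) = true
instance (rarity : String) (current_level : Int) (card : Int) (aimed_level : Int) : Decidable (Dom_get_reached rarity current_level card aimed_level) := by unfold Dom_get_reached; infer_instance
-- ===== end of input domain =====

-- B replaces A's per-index accumulation loop by prefix-sum tables (total = P[end] - P[start]) behind an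
-- early return for an empty range; objective: alternative decomposition, same cost on these fixed tables.

-- ===== PORT A =====
-- the constant tables of A, lifted to named helpers
def pvLevels : List Int := [1, 2, 3, 4, 5, 6, 7, 8, 9, 10, 11, 12, 13, 14, 15, 16]
def pvCards : List Int := [0, 20, 50, 100, 170, 250, 350, 500, 700, 1000, 1400, 1900, 2500, 3200, 4000, 5000, 0]
def pvRings : List Int := [0, 500, 2500, 8000, 16000, 32000, 50000, 80000, 120000, 150000, 180000, 240000, 300000, 400000, 550000, 750000, 0]
def pvExps : List Int := [0, 50, 100, 150, 200, 250, 350, 450, 550, 650, 750, 900, 1050, 1200, 1350, 1600, 0]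

-- literal port of A: two levels.index computations, then one accumulation loop over range(start, aimed_level_index).
-- levels.index raises ValueError when the level is absent (index? = none; Pre_ excludes it); for a rarity other
-- than "Challenger" the tables are unbound, so the loop body raises UnboundLocalError whenever the range is
-- nonempty (Pre_ excludes it) and A returns (total_cards - card, 0, 0) when the range is empty.
def get_reached (rarity : String) (current_level : Int) (card : Int) (aimed_level : Int) : Int × Int × Int :=
  match PySem.List.index? pvLevels (if current_level == 0 then current_level + 1 else current_level),
        PySem.List.index? pvLevels aimed_level with
  | some i, some j =>
    let aimed_level_index : Int := (j : Int) + 1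
    let tc0 : Int := if current_level != 0 then 0 else 500
    let s : Int := if current_level != 1 then (i : Int) + 1 else (i : Int)
    if rarity == "Challenger" then
      let t := (PySem.List.pyRange s aimed_level_index 1).foldl
        (fun acc k =>
          (acc.1 + PySem.List.pyGetD pvCards k 0,
           acc.2.1 + PySem.List.pyGetD pvRings k 0,
           acc.2.2 + PySem.List.pyGetD pvExps k 0)) (tc0, 0, 0)
      (t.1 - card, t.2.1, t.2.2)
    else
      -- non-Challenger: the empty loop leaves the totals at (tc0, 0, 0); a nonempty loop raises (outside Pre_),
      -- so this value is only claimed for the empty range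
      (tc0 - card, 0, 0)
  | _, _ => (0, 0, 0)  -- outside Pre_: Python raises ValueError

-- ===== PORT B =====
-- _prefix of Source B: out = [0]; for x in xs: out.append(out[-1] + x)
def pvPrefix (xs : List Int) : List Int :=
  xs.foldl (fun out x => out ++ [PySem.List.pyGetD out (-1) 0 + x]) [0]

def get_reached_alt (rarity : String) (current_level : Int) (card : Int) (aimed_level : Int) : Int × Int × Int :=
  let levels := PySem.List.pyRange 1 17 1
  match PySem.List.index? levels (if current_level == 0 then current_level + 1 else current_level) with
  | none => (0, 0, 0)  -- outside Pre_: Python raises ValueError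
  | some i =>
   match PySem.List.index? levels aimed_level with
   | none => (0, 0, 0)  -- outside Pre_: Python raises ValueError
   | some j =>
    let endI : Int := (j : Int) + 1
    let start : Int := if current_level == 1 then (i : Int) else (i : Int) + 1
    let base : Int := if current_level == 0 then 500 else 0
    if endI ≤ start then (base - card, 0, 0)  -- nothing to sum
    else if rarity == "Challenger" then
      let cards : List Int := [0, 20, 50, 100, 170, 250, 350, 500, 700, 1000, 1400, 1900, 2500, 3200, 4000, 5000, 0]
      let rings : List Int := [0, 500, 2500, 8000, 16000, 32000, 50000, 80000, 120000, 150000, 180000, 240000, 300000, 400000, 550000, 750000, 0]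
      let exps : List Int := [0, 50, 100, 150, 200, 250, 350, 450, 550, 650, 750, 900, 1050, 1200, 1350, 1600, 0]
      let pc := pvPrefix cards
      let pr := pvPrefix rings
      let pe := pvPrefix exps
      (base + PySem.List.pyGetD pc endI 0 - PySem.List.pyGetD pc start 0 - card,
       PySem.List.pyGetD pr endI 0 - PySem.List.pyGetD pr start 0,
       PySem.List.pyGetD pe endI 0 - PySem.List.pyGetD pe start 0)
    else (base - card, 0, 0)  -- unreachable under Pre_: Python raises UnboundLocalError here

-- ===== PRECONDITION & SPEC =====
-- Pre_ admits exactly the inputs on which A returns: levels inside A's table (else levels.index raises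
-- ValueError) and either rarity "Challenger" or an empty summation range (else the loop body reads the
-- unbound tables and raises UnboundLocalError).
def Pre_get_reached (rarity : String) (current_level : Int) (card : Int) (aimed_level : Int) : Prop :=
  0 ≤ current_level ∧ current_level ≤ 16 ∧ 1 ≤ aimed_level ∧ aimed_level ≤ 16 ∧
    (rarity = "Challenger" ∨ (current_level = 0 ∧ aimed_level = 1) ∨ (2 ≤ current_level ∧ aimed_level ≤ current_level))
instance (rarity : String) (current_level : Int) (card : Int) (aimed_level : Int) : Decidable (Pre_get_reached rarity current_level card aimed_level) := by unfold Pre_get_reached; infer_instance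
def pvWitness_get_reached : String × Int × Int × Int := ("Challenger", 0, 30, 3)

def Spec_get_reached (rarity : String) (current_level : Int) (card : Int) (aimed_level : Int) (out : Int × Int × Int) : Prop := out = get_reached_alt rarity current_level card aimed_level
instance (rarity : String) (current_level : Int) (card : Int) (aimed_level : Int) (out : Int × Int × Int) : Decidable (Spec_get_reached rarity current_level card aimed_level out) := by unfold Spec_get_reached; infer_instance

-- ===== CLAIM (what is proved, stated in full; the proofs are below) =====
def Claim_equal_get_reached : Prop := ∀ (rarity : String) (current_level : Int) (card : Int) (aimed_level : Int), Dom_get_reached rarity current_level card aimed_level → Pre_get_reached rarity current_level card aimed_level → Spec_get_reached rarity current_level card aimed_level (get_reached rarity current_level card aimed_level)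

-- ===== LEMMAS AND PROOFS =====

theorem levels_eq : PySem.List.pyRange 1 17 1 = pvLevels := by decide

-- card only enters each port in the final subtraction: shift it out.
theorem shiftA (rarity : String) (cl card al : Int)
    (hi : (PySem.List.index? pvLevels (if cl == 0 then cl + 1 else cl)).isSome)
    (hj : (PySem.List.index? pvLevels al).isSome) :
    get_reached rarity cl card al
      = ((get_reached rarity cl 0 al).1 - card,
         (get_reached rarity cl 0 al).2.1,
         (get_reached rarity cl 0 al).2.2) := by
  unfold get_reached
  cases h1 : PySem.List.index? pvLevels (if cl == 0 then cl + 1 else cl) with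
  | none => rw [h1] at hi; simp at hi
  | some i =>
    cases h2 : PySem.List.index? pvLevels al with
    | none => rw [h2] at hj; simp at hj
    | some j => simp; split <;> first | rfl | simp

theorem shiftB (rarity : String) (cl card al : Int)
    (hi : (PySem.List.index? pvLevels (if cl == 0 then cl + 1 else cl)).isSome)
    (hj : (PySem.List.index? pvLevels al).isSome) :
    get_reached_alt rarity cl card al
      = ((get_reached_alt rarity cl 0 al).1 - card,
         (get_reached_alt rarity cl 0 al).2.1,
         (get_reached_alt rarity cl 0 al).2.2) := by
  simp only [get_reached_alt, levels_eq]
  cases h1 : PySem.List.index? pvLevels (if cl == 0 then cl + 1 else cl) with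
  | none => rw [h1] at hi; simp at hi
  | some i =>
    cases h2 : PySem.List.index? pvLevels al with
    | none => rw [h2] at hj; simp at hj
    | some j => simp; split <;> (try split) <;> (try split) <;> first | rfl | simp

theorem someA : ∀ n ∈ List.range 17,
    (PySem.List.index? pvLevels (if ((n : Nat) : Int) == 0 then ((n : Nat) : Int) + 1 else ((n : Nat) : Int))).isSome := by decide

theorem someB : ∀ m ∈ List.range 16,
    (PySem.List.index? pvLevels (((m : Nat) : Int) + 1)).isSome := by decide

theorem idx : ∀ n ∈ List.range 16, List.idxOf? (((n : Nat) : Int) + 1) pvLevels = some n := by decide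

-- the two card-free cores agree for rarity "Challenger" on the whole level table
theorem key : ∀ n ∈ List.range 17, ∀ m ∈ List.range 16,
    get_reached "Challenger" ((n : Nat) : Int) 0 (((m : Nat) : Int) + 1)
      = get_reached_alt "Challenger" ((n : Nat) : Int) 0 (((m : Nat) : Int) + 1) := by decide

-- the two card-free cores agree for any other rarity on the empty-range inputs Pre_ admits
theorem keyOther (rarity : String) (cl al : Int) (hr : (rarity == "Challenger") = false)
    (h0 : 0 ≤ cl) (h16 : cl ≤ 16) (h1 : 1 ≤ al) (h16' : al ≤ 16)
    (he : (cl = 0 ∧ al = 1) ∨ (2 ≤ cl ∧ al ≤ cl)) :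
    get_reached rarity cl 0 al = get_reached_alt rarity cl 0 al := by
  rcases he with ⟨hc, ha⟩ | ⟨hc, ha⟩
  · subst hc; subst ha
    simp [get_reached, get_reached_alt, levels_eq, hr,
      show List.idxOf? (1 : Int) pvLevels = some 0 from by decide]
  · have hk : cl = ((cl.toNat - 1 : Nat) : Int) + 1 := by omega
    have hl : al = ((al.toNat - 1 : Nat) : Int) + 1 := by omega
    have hc0 : (cl == 0) = false := by simp; omega
    have hc1 : (cl == 1) = false := by simp; omega
    have hik : List.idxOf? cl pvLevels = some (cl.toNat - 1) := by
      rw [hk]; exact idx _ (by rw [List.mem_range]; omega)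
    have hjl : List.idxOf? al pvLevels = some (al.toNat - 1) := by
      rw [hl]; exact idx _ (by rw [List.mem_range]; omega)
    simp [get_reached, get_reached_alt, levels_eq, hr, hc0, hc1, hik, hjl,
      show ((al.toNat - 1 : Nat) : Int) + 1 ≤ ((cl.toNat - 1 : Nat) : Int) + 1 from by omega]
    omega

-- ===== VERDICT (by name: the statement is the Claim_ definition above) =====
theorem get_reached_spec : Claim_equal_get_reached := by
  intro rarity cl card al _ hpre
  obtain ⟨h0, h16, h1, h16', hor⟩ := hpre
  unfold Spec_get_reached
  have ecl : cl = ((cl.toNat : Nat) : Int) := by omega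
  have eal : al = (((al - 1).toNat : Nat) : Int) + 1 := by omega
  have hn : cl.toNat ∈ List.range 17 := by rw [List.mem_range]; omega
  have hm : (al - 1).toNat ∈ List.range 16 := by rw [List.mem_range]; omega
  have hi : (PySem.List.index? pvLevels (if cl == 0 then cl + 1 else cl)).isSome := by
    rw [ecl]; exact someA _ hn
  have hj : (PySem.List.index? pvLevels al).isSome := by
    rw [eal]; exact someB _ hm
  rw [shiftA rarity cl card al hi hj, shiftB rarity cl card al hi hj]
  suffices h : get_reached rarity cl 0 al = get_reached_alt rarity cl 0 al by rw [h]
  by_cases hrc : (rarity == "Challenger") = true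
  · have hre := eq_of_beq hrc
    subst hre
    rw [ecl, eal]
    exact key _ hn _ hm
  · have hrf : (rarity == "Challenger") = false := by simpa using hrc
    rcases hor with hch | he
    · subst hch; simp at hrf
    · exact keyOther rarity cl al hrf h0 h16 h1 h16' he
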